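-- pv_equiv track=rewrite | github.com/sboora/stringsync | student_app.py | filter_consecutive_notes
-- ===== SOURCE A (Python) =====
-- def filter_consecutive_notes(notes, min_consecutive=3):
--     """
--     Filters out notes that don't appear consecutively at least `min_consecutive` times.
--
--     Parameters:
--         notes (list): List of detected notes.
--         min_consecutive (int): Minimum number of consecutive occurrences for a note to be considered.
--
--     Returns:
--         list: List of filtered notes.
--     """
--     filtered_notes = []
--     prev_note = None
--     count = 0
--     for note in notes:
--         if note == prev_note:
--             count += 1
--         else:
--             count = 1
--         if count == min_consecutive:
--             filtered_notes.append(note)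
--         prev_note = note
--     filtered_notes = list(dict.fromkeys(filtered_notes))
--     return filtered_notes
-- ===== SOURCE B (Python) =====
-- def filter_consecutive_notes(notes, min_consecutive=3):
--     """Run-grouping re-implementation: split into maximal runs of equal
--     consecutive notes, keep a run's note when 1 <= min_consecutive <= run length,
--     then dedup keeping first occurrence."""
--     result = []
--     i = 0
--     n = len(notes)
--     while i < n:
--         j = i + 1
--         while j < n and notes[j] == notes[i]:
--             j += 1
--         if 1 <= min_consecutive <= j - i:
--             result.append(notes[i])
--         i = j
--     return list(dict.fromkeys(result))
-- ===== Notes on version B (the rewrite author's own statement) =====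
-- stated objective: alternative
-- what changed: Replaces A's per-element prev_note/count bookkeeping with a two-pointer pass over maximal runs of equal consecutive notes, keeping a run's note when 1 <= min_consecutive <= run length, then deduplicating.
import Mathlib
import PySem

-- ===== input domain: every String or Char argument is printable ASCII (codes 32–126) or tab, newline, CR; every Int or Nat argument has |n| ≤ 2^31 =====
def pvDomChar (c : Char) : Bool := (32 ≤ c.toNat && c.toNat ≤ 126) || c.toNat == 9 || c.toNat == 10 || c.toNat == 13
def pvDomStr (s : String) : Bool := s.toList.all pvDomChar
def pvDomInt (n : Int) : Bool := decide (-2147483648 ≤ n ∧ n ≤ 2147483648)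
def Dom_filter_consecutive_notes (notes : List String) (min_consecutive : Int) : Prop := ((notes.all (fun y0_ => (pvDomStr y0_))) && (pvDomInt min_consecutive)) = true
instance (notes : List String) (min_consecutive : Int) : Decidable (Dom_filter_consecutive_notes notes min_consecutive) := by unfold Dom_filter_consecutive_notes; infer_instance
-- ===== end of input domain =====

-- B is a structurally different re-implementation (two-pointer pass over maximal runs
-- of equal consecutive notes instead of A's prev_note/count bookkeeping); same cost.

-- list(dict.fromkeys(xs)): keep first occurrence of each element, in order (used verbatim
-- by both Pythons as their last line)
def pyDedup (xs : List String) : List String :=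
  xs.foldl (fun acc x => if x ∈ acc then acc else acc ++ [x]) []

-- ===== PORT A =====
-- A's loop state: accumulated filtered_notes, prev_note (None ↦ none), count
def loopA (m : Int) : List String → List String → Option String → Int → List String
  | [], acc, _, _ => acc
  | note :: rest, acc, prev, count =>
    let c := if some note = prev then count + 1 else 1
    let acc' := if c = m then acc ++ [note] else acc
    loopA m rest acc' (some note) c

def filter_consecutive_notes (notes : List String) (min_consecutive : Int) : List String :=
  pyDedup (loopA min_consecutive notes [] none 0)

-- ===== PORT B =====
-- B's inner while loop: length of the maximal run of x at the front (counting x itself),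
-- and the remainder of the list
def runFrom (x : String) : List String → Int × List String
  | [] => (1, [])
  | y :: ys => if y = x then ((runFrom x ys).1 + 1, (runFrom x ys).2) else (1, y :: ys)

theorem runFrom_len_le (x : String) : ∀ (xs : List String), (runFrom x xs).2.length ≤ xs.length
  | [] => by simp [runFrom]
  | y :: ys => by
    simp only [runFrom]
    split
    · exact Nat.le_succ_of_le (runFrom_len_le x ys)
    · simp

-- B's outer while loop: the list of maximal runs (note, run length)
def runs : List String → List (String × Int)
  | [] => []
  | x :: xs => (x, (runFrom x xs).1) :: runs (runFrom x xs).2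
termination_by l => l.length
decreasing_by exact Nat.lt_succ_of_le (runFrom_len_le _ _)

-- B's conditional append: keep a run's note when 1 ≤ min_consecutive ≤ run length
def selRuns (m : Int) : List (String × Int) → List String
  | [] => []
  | (k, n) :: rs => (if 1 ≤ m ∧ m ≤ n then [k] else []) ++ selRuns m rs

def filter_consecutive_notes_alt (notes : List String) (min_consecutive : Int) : List String :=
  pyDedup (selRuns min_consecutive (runs notes))

-- ===== PRECONDITION & SPEC =====
def Spec_filter_consecutive_notes (notes : List String) (min_consecutive : Int) (out : List String) : Prop := out = filter_consecutive_notes_alt notes min_consecutive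
instance (notes : List String) (min_consecutive : Int) (out : List String) : Decidable (Spec_filter_consecutive_notes notes min_consecutive out) := by unfold Spec_filter_consecutive_notes; infer_instance

-- ===== CLAIM (what is proved, stated in full; the proofs are below) =====
def Claim_equal_filter_consecutive_notes : Prop := ∀ (notes : List String) (min_consecutive : Int), Dom_filter_consecutive_notes notes min_consecutive → Spec_filter_consecutive_notes notes min_consecutive (filter_consecutive_notes notes min_consecutive)

-- ===== LEMMAS AND PROOFS =====

-- one unfolding step of A's loop (definitional)
theorem loopA_cons (m : Int) (n : String) (rest acc : List String) (prev : Option String) (c : Int) :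
    loopA m (n :: rest) acc prev c =
      loopA m rest (if (if some n = prev then c + 1 else 1) = m then acc ++ [n] else acc)
        (some n) (if some n = prev then c + 1 else 1) := rfl

theorem runFrom_pos (x : String) : ∀ (xs : List String), 1 ≤ (runFrom x xs).1
  | [] => by simp [runFrom]
  | y :: ys => by
    simp only [runFrom]
    split
    · have := runFrom_pos x ys; omega
    · simp

theorem runFrom_rest_head (x : String) : ∀ (xs : List String) (y : String),
    (runFrom x xs).2.head? = some y → y ≠ x
  | [], y => by simp [runFrom]
  | z :: zs, y => by
    simp only [runFrom]
    split
    · exact runFrom_rest_head x zs y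
    · rename_i hz
      intro h; simp at h; subst h; exact hz

-- consuming the continuation of a run of x whose first occurrence(s) already counted c
theorem run_step (x : String) (m : Int) : ∀ (xs : List String) (acc : List String) (c : Int),
    loopA m xs acc (some x) c =
      loopA m (runFrom x xs).2
        (acc ++ (if c < m ∧ m ≤ c + (runFrom x xs).1 - 1 then [x] else []))
        (some x) (c + (runFrom x xs).1 - 1)
  | [], acc, c => by
    simp only [runFrom, loopA]
    rw [if_neg (by omega : ¬(c < m ∧ m ≤ c + 1 - 1))]
    simp
  | y :: ys, acc, c => by
    by_cases hy : y = x
    · subst hy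
      have hn := runFrom_pos y ys
      have hr : runFrom y (y :: ys) = ((runFrom y ys).1 + 1, (runFrom y ys).2) := by
        simp [runFrom]
      rw [hr, loopA_cons, if_pos rfl, run_step y m ys]
      have key : (if c + 1 = m then acc ++ [y] else acc) ++
            (if c + 1 < m ∧ m ≤ c + 1 + (runFrom y ys).1 - 1 then [y] else []) =
          acc ++ (if c < m ∧ m ≤ c + ((runFrom y ys).1 + 1) - 1 then [y] else []) := by
        split_ifs <;> first | (exfalso; omega) | simp
      rw [key]
      have hc : c + 1 + (runFrom y ys).1 - 1 = c + ((runFrom y ys).1 + 1) - 1 := by ring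
      rw [hc]
    · simp only [runFrom, if_neg hy]
      rw [if_neg (by omega : ¬(c < m ∧ m ≤ c + 1 - 1))]
      have hc : c + 1 - 1 = c := by ring
      rw [hc, List.append_nil]

-- starting fresh (prev is not the head of the remaining list): A's loop yields the
-- run-selected list
theorem fresh (m : Int) : ∀ (k : Nat) (notes : List String), notes.length ≤ k →
    ∀ (acc : List String) (prev : Option String) (c : Int),
    (∀ y, notes.head? = some y → prev ≠ some y) →
    loopA m notes acc prev c = acc ++ selRuns m (runs notes)
  | 0, notes, hk => by
    have : notes = [] := List.length_eq_zero_iff.mp (Nat.le_zero.mp hk)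
    subst this
    intro acc prev c _
    simp [loopA, runs, selRuns]
  | k + 1, [], _ => by intro acc prev c _; simp [loopA, runs, selRuns]
  | k + 1, x :: xs, hk => by
    intro acc prev c hprev
    have hpx : ¬ some x = prev := fun h => hprev x (by simp) h.symm
    have hn := runFrom_pos x xs
    rw [loopA_cons, if_neg hpx, run_step x m xs]
    have hrest : (runFrom x xs).2.length ≤ k := by
      have h1 := runFrom_len_le x xs
      simp only [List.length_cons] at hk
      omega
    rw [fresh m k (runFrom x xs).2 hrest _ (some x) _
      (fun y hy h => (runFrom_rest_head x xs y hy) (by simpa using h.symm))]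
    rw [runs]
    simp only [selRuns]
    have key : (if (1 : Int) = m then acc ++ [x] else acc) ++
          (if 1 < m ∧ m ≤ 1 + (runFrom x xs).1 - 1 then [x] else []) =
        acc ++ (if 1 ≤ m ∧ m ≤ (runFrom x xs).1 then [x] else []) := by
      split_ifs <;> first | (exfalso; omega) | simp
    rw [key, List.append_assoc]

-- ===== VERDICT (by name: the statement is the Claim_ definition above) =====
theorem filter_consecutive_notes_spec : Claim_equal_filter_consecutive_notes := by
  intro notes m _
  unfold Spec_filter_consecutive_notes filter_consecutive_notes filter_consecutive_notes_alt
  rw [fresh m notes.length notes le_rfl [] none 0 (by simp)]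
  simp
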